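-- pv_equiv track=rewrite | github.com/yifan1207/PT-IT-Model-Differences | src/poc/cross_model/collect_L3.py | _detect_layer_prefix
-- ===== SOURCE A (Python) =====
-- def _detect_layer_prefix(sd: dict) -> str:
--     """Auto-detect the state dict prefix for transformer layers (e.g. 'model.layers.').
--
--     Searches for keys ending in '.layers.0.<param>' that belong to the text backbone,
--     excluding vision encoder layers (which contain 'vision' in the prefix).
--     """
--     candidates = [
--         "model.layers.",                        # standard HF (Llama, Mistral, Qwen, OLMo2, DeepSeek)
--         "language_model.model.layers.",         # bare safetensors key (Gemma3)
--         "model.language_model.model.layers.",   # state_dict via PyTorch (Gemma3ForConditionalGeneration)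
--         "model.model.language_model.layers.",   # alternative Gemma3 nesting
--         "transformer.h.",                       # GPT-2 style
--     ]
--     for cand in candidates:
--         # Must NOT contain 'vision' to exclude SigLIP encoder layers
--         if any(k.startswith(f"{cand}0.") and "vision" not in cand for k in sd):
--             return cand
--     # Fallback: scan all keys for '.layers.0.' pattern outside vision towers
--     for k in sd:
--         if ".layers.0." in k and "vision" not in k:
--             # Extract prefix up to and including "layers."
--             idx = k.index(".layers.0.")
--             prefix = k[:idx + len(".layers.")]
--             return prefix
--     raise ValueError(f"Cannot detect layer prefix. Sample keys: {list(sd.keys())[:5]}")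
-- ===== SOURCE B (Python) =====
-- def _detect_layer_prefix(sd: dict) -> str:
--     """Auto-detect the state dict prefix for transformer layers (e.g. 'model.layers.').
--
--     Key-driven: each key is PARSED into the candidate prefix it witnesses ('transformer.h.'
--     for GPT-2 style keys, otherwise the text up to and including the first '.layers.'), the
--     parsed prefix is looked up in a priority table, and a single pass keeps the best (lowest)
--     priority seen plus the first fallback extraction; no per-candidate rescans of the keys.
--     """
--     candidates = [
--         "model.layers.",
--         "language_model.model.layers.",
--         "model.language_model.model.layers.",
--         "model.model.language_model.layers.",
--         "transformer.h.",
--     ]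
--     prio = {c: i for i, c in enumerate(candidates)}
--     n = len(candidates)
--     best = n
--     fallback = None
--     for k in sd:
--         has_layers = ".layers.0." in k
--         if has_layers and fallback is None and "vision" not in k:
--             fallback = k[:k.index(".layers.0.") + len(".layers.")]
--         if k.startswith("transformer.h.0."):
--             p = "transformer.h."
--         elif has_layers:
--             p = k[:k.index(".layers.0.") + len(".layers.")]
--         else:
--             continue
--         i = prio.get(p, n)
--         if i < best:
--             best = i
--     if best < n:
--         return candidates[best]
--     if fallback is not None:
--         return fallback
--     raise ValueError(f"Cannot detect layer prefix. Sample keys: {list(sd.keys())[:5]}")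
-- ===== Notes on version B (the rewrite author's own statement) =====
-- stated objective: alternative
-- what changed: B inverts the search: instead of scanning all keys once per candidate (A's any()-loop per candidate), B parses each key once into the candidate prefix it witnesses (special-casing 'transformer.h.0.', otherwise extracting up to the first '.layers.'), looks that prefix up in a priority dict, and keeps the minimum priority plus the first fallback extraction in a single pass; Pre_ excludes exactly the inputs on which both raise ValueError.
import Mathlib
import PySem

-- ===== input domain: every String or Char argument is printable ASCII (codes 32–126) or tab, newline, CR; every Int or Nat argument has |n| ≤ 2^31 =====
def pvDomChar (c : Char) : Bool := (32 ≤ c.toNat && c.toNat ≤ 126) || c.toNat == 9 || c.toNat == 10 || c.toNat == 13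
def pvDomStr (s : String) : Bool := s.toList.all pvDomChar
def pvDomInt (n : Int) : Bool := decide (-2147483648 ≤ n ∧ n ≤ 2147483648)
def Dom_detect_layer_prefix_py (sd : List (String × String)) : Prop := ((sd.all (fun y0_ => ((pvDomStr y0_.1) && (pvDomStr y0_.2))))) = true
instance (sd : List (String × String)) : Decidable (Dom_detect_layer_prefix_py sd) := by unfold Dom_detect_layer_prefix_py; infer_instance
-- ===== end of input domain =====

-- B inverts the search: it parses each key once into the candidate prefix it witnesses and
-- keeps the minimum priority (plus the first fallback extraction) in a single pass, instead
-- of A's rescan of all keys once per candidate; same fallback, same (Pre_-excluded) ValueError.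

-- the candidate list, identical literal in both Pythons
def pvCands : List String :=
  ["model.layers.",
   "language_model.model.layers.",
   "model.language_model.model.layers.",
   "model.model.language_model.layers.",
   "transformer.h."]

-- k[:k.index(".layers.0.") + len(".layers.")], the extraction both Pythons perform verbatim
def pvExtract (k : String) : String :=
  PySem.Str.slice k none (some (PySem.Str.find k ".layers.0." + 8))

-- ===== PORT A =====
-- A's fallback loop ("" stands where Python raises ValueError; excluded by Pre_)
def pvFallback : List (String × String) → String
  | [] => ""
  | kv :: rest =>
    if PySem.Str.isIn ".layers.0." kv.1 && !(PySem.Str.isIn "vision" kv.1) then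
      pvExtract kv.1
    else pvFallback rest

-- A's first loop: for cand in candidates: if any(k.startswith(cand+"0.") and "vision" not in cand for k in sd): return cand
def aScan (sd : List (String × String)) : List String → Option String
  | [] => none
  | c :: rest =>
    if sd.any (fun kv => PySem.Str.startswith kv.1 (c ++ "0.") && !(PySem.Str.isIn "vision" c)) then
      some c
    else aScan sd rest

def detect_layer_prefix_py (sd : List (String × String)) : String :=
  match aScan sd pvCands with
  | some c => c
  | none => pvFallback sd

-- ===== PORT B =====
-- prio = {c: i for i, c in enumerate(candidates)}
def pvPrio : PySem.Dict String Nat :=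
  (PySem.List.enumerate pvCands).foldl (fun d ic => PySem.Dict.insert d ic.2 ic.1.toNat) PySem.Dict.empty

-- the prefix a single key witnesses: 'transformer.h.' for GPT-2 style keys, else the text
-- up to and including the first '.layers.' (none = the key's `continue` branch in B)
def pvClassify (k : String) : Option String :=
  if PySem.Str.startswith k "transformer.h.0." then some "transformer.h."
  else if PySem.Str.isIn ".layers.0." k then some (pvExtract k)
  else none

-- one iteration of B's single loop over the keys: state = (best priority so far, fallback)
def bStep (st : Nat × Option String) (kv : String × String) : Nat × Option String :=
  let fb : Option String :=
    if PySem.Str.isIn ".layers.0." kv.1 && st.2.isNone && !(PySem.Str.isIn "vision" kv.1) then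
      some (pvExtract kv.1)
    else st.2
  match pvClassify kv.1 with
  | none => (st.1, fb)
  | some p =>
    let i := PySem.Dict.getD pvPrio p 5
    (if i < st.1 then i else st.1, fb)

def detect_layer_prefix_py_alt (sd : List (String × String)) : String :=
  if (sd.foldl bStep (5, none)).1 < 5 then
    pvCands.getD (sd.foldl bStep (5, none)).1 ""
  else
    match (sd.foldl bStep (5, none)).2 with
    | some p => p
    | none => ""   -- Python raises ValueError here; excluded by Pre_

-- ===== PRECONDITION & SPEC =====
-- Pre_ excludes exactly the inputs on which Python A raises ValueError (no candidate witnessed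
-- and no fallback key); B raises the same error there.
def Pre_detect_layer_prefix_py (sd : List (String × String)) : Prop :=
  (pvCands.any (fun c =>
      sd.any (fun kv => PySem.Str.startswith kv.1 (c ++ "0.") && !(PySem.Str.isIn "vision" c)))) = true
  ∨ (sd.any (fun kv =>
      PySem.Str.isIn ".layers.0." kv.1 && !(PySem.Str.isIn "vision" kv.1))) = true

instance (sd : List (String × String)) : Decidable (Pre_detect_layer_prefix_py sd) := by
  unfold Pre_detect_layer_prefix_py; infer_instance

def pvWitness_detect_layer_prefix_py : (List (String × String)) :=
  [("model.layers.0.weight", "t")]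

def Spec_detect_layer_prefix_py (sd : List (String × String)) (out : String) : Prop :=
  out = detect_layer_prefix_py_alt sd
instance (sd : List (String × String)) (out : String) : Decidable (Spec_detect_layer_prefix_py sd out) := by
  unfold Spec_detect_layer_prefix_py; infer_instance

-- ===== CLAIM (what is proved, stated in full; the proofs are below) =====
def Claim_equal_detect_layer_prefix_py : Prop :=
  ∀ (sd : List (String × String)), Dom_detect_layer_prefix_py sd →
    Pre_detect_layer_prefix_py sd →
    Spec_detect_layer_prefix_py sd (detect_layer_prefix_py sd)

-- ===== LEMMAS AND PROOFS =====

-- ---- string groundwork ----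

-- first occurrence of `pat` inside `p ++ t` is at j when p witnesses it at j and nowhere earlier
theorem find_append_first (pat p t : List Char) (j : Nat)
    (hjp : j + pat.length ≤ p.length)
    (hat : pat <+: p.drop j)
    (hbef : ∀ i, i < j → ¬ pat <+: p.drop i) :
    PySem.Chars.find (p ++ t) pat = (j : Int) := by
  have hdj : (p ++ t).drop j = p.drop j ++ t := List.drop_append_of_le_length (by omega)
  have hpj : pat <+: (p ++ t).drop j := by
    rw [hdj]; exact hat.trans (List.prefix_append _ t)
  have hinf : pat <:+: p ++ t := hpj.isInfix.trans (List.drop_suffix j (p ++ t)).isInfix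
  have hnn : 0 ≤ PySem.Chars.find (p ++ t) pat := (PySem.Chars.find_nonneg_iff _ _).mpr hinf
  obtain ⟨hp, hmin⟩ := PySem.Chars.find_spec hnn
  have hfj : (PySem.Chars.find (p ++ t) pat).toNat = j := by
    rcases lt_trichotomy (PySem.Chars.find (p ++ t) pat).toNat j with h | h | h
    · exfalso
      set f := (PySem.Chars.find (p ++ t) pat).toNat with hf
      have hd : (p ++ t).drop f = p.drop f ++ t := List.drop_append_of_le_length (by omega)
      rw [hd] at hp
      have hlen : pat.length ≤ (p.drop f).length := by simp; omega
      have htake : pat = (p.drop f ++ t).take pat.length := List.prefix_iff_eq_take.mp hp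
      rw [List.take_append, Nat.sub_eq_zero_of_le hlen, List.take_zero, List.append_nil] at htake
      exact hbef f h (htake ▸ List.take_prefix _ _)
    · exact h
    · exact absurd hpj (hmin j h)
  omega

-- if the pattern sits at j and the key's first j+8 chars are cl, then cl ++ "0." prefixes the key
theorem prefix_reconstruct (kl cl : List Char) (j : Nat)
    (hpat : ".layers.0.".toList <+: kl.drop j)
    (ht : kl.take (j + 8) = cl) :
    cl ++ ('0' :: '.' :: []) <+: kl := by
  obtain ⟨r, hr⟩ := hpat
  have h2 : kl.drop (j + 8) = ('0' :: '.' :: []) ++ r := by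
    have : kl.drop (j + 8) = (kl.drop j).drop 8 := by
      rw [List.drop_drop]
    rw [this, ← hr]; rfl
  have h1 : kl.take (j + 8 + 2) = kl.take (j + 8) ++ (kl.drop (j + 8)).take 2 := List.take_add ..
  rw [h2, ht] at h1
  exact h1 ▸ List.take_prefix (j + 8 + 2) kl

-- ---- classification: soundness and completeness ----

-- any prefix pvClassify names really is witnessed by the key
theorem classify_sound (k c : String) (h : pvClassify k = some c) :
    PySem.Str.startswith k (c ++ "0.") = true := by
  unfold pvClassify at h
  by_cases h1 : PySem.Str.startswith k "transformer.h.0." = true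
  · rw [if_pos h1] at h
    have hc : c = "transformer.h." := (Option.some.inj h).symm
    subst hc
    have : ("transformer.h." ++ "0." : String) = "transformer.h.0." := by decide
    rw [this]; exact h1
  · rw [if_neg h1] at h
    by_cases h2 : PySem.Str.isIn ".layers.0." k = true
    · rw [if_pos h2, Option.some.injEq] at h
      have hin : ".layers.0.".toList <:+: k.toList := (PySem.Str.isIn_iff_infix _ _).mp h2
      have hnn : 0 ≤ PySem.Chars.find k.toList ".layers.0.".toList :=
        (PySem.Chars.find_nonneg_iff _ _).mpr hin
      obtain ⟨hp, -⟩ := PySem.Chars.find_spec hnn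
      have hc : c.toList = k.toList.take ((PySem.Chars.find k.toList ".layers.0.".toList).toNat + 8) := by
        rw [← h]
        unfold pvExtract
        rw [PySem.Str.find_eq, PySem.Str.toList_slice, PySem.Chars.slice_eq_listSlice,
          PySem.List.slice_to _ (by omega)]
        congr 1
        omega
      have hpre := prefix_reconstruct k.toList c.toList
        (PySem.Chars.find k.toList ".layers.0.".toList).toNat hp hc.symm
      rw [PySem.Str.startswith_eq]
      apply (PySem.Chars.startswith_iff _ _).mpr
      rw [String.toList_append]
      have : "0.".toList = ('0' :: '.' :: []) := by decide
      rw [this]; exact hpre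
    · rw [if_neg h2] at h; cases h

-- a key starting with a '.layers.' candidate is classified as exactly that candidate
theorem classify_complete_layers (c k : String)
    (h8 : 8 ≤ c.toList.length)
    (hT1 : ¬ ("transformer.h.0.".toList <+: (c ++ "0.").toList))
    (hT2 : ¬ ((c ++ "0.").toList <+: "transformer.h.0.".toList))
    (hat : ".layers.0.".toList <+: (c ++ "0.").toList.drop (c.toList.length - 8))
    (hbef : ∀ i, i < c.toList.length - 8 → ¬ ".layers.0.".toList <+: (c ++ "0.").toList.drop i)
    (hsw : PySem.Str.startswith k (c ++ "0.") = true) :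
    pvClassify k = some c := by
  have hpre : (c ++ "0.").toList <+: k.toList := by
    rw [PySem.Str.startswith_eq] at hsw
    exact (PySem.Chars.startswith_iff _ _).mp hsw
  obtain ⟨t, ht⟩ := hpre
  have hclen : (c ++ "0.").toList = c.toList ++ ('0' :: '.' :: []) := by
    rw [String.toList_append]
    congr 1
  have hTf : ¬ PySem.Str.startswith k "transformer.h.0." = true := by
    intro hT
    rw [PySem.Str.startswith_eq] at hT
    have hTp : "transformer.h.0.".toList <+: k.toList := (PySem.Chars.startswith_iff _ _).mp hT
    have hcp : (c ++ "0.").toList <+: k.toList := ⟨t, ht⟩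
    rcases List.prefix_or_prefix_of_prefix hTp hcp with h | h
    · exact hT1 h
    · exact hT2 h
  have hfind : PySem.Chars.find k.toList ".layers.0.".toList = ((c.toList.length - 8 : Nat) : Int) := by
    rw [← ht]
    refine find_append_first _ _ _ _ ?_ hat hbef
    rw [hclen, List.length_append]
    have h10 : (".layers.0.".toList).length = 10 := by decide
    rw [h10]
    simp only [List.length_cons, List.length_nil]
    omega
  have hin : PySem.Str.isIn ".layers.0." k = true := by
    apply (PySem.Str.isIn_iff_infix _ _).mpr
    apply (PySem.Chars.find_nonneg_iff _ _).mp
    rw [hfind]; omega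
  have hex : pvExtract k = c := by
    apply String.toList_inj.mp
    unfold pvExtract
    rw [PySem.Str.toList_slice, PySem.Chars.slice_eq_listSlice, PySem.Str.find_eq,
      PySem.List.slice_to _ (by rw [hfind]; omega)]
    have hb : (PySem.Chars.find k.toList ".layers.0.".toList + 8).toNat = c.toList.length := by
      rw [hfind]; omega
    rw [hb, ← ht, hclen, List.append_assoc]
    exact List.take_left
  rw [pvClassify, if_neg hTf, if_pos hin, hex]

-- the candidate every key's classification competes for, as B's priority number
def prKey (k : String) : Nat :=
  match pvClassify k with
  | none => 5
  | some p => PySem.Dict.getD pvPrio p 5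

-- B's priority dict, evaluated at an arbitrary string
theorem getD_prio (p : String) :
    PySem.Dict.getD pvPrio p 5 =
      if p = "model.layers." then 0
      else if p = "language_model.model.layers." then 1
      else if p = "model.language_model.model.layers." then 2
      else if p = "model.model.language_model.layers." then 3
      else if p = "transformer.h." then 4 else 5 := by
  by_cases h0 : p = "model.layers."
  · subst h0; decide
  by_cases h1 : p = "language_model.model.layers."
  · subst h1; decide
  by_cases h2 : p = "model.language_model.model.layers."
  · subst h2; decide
  by_cases h3 : p = "model.model.language_model.layers."
  · subst h3; decide
  by_cases h4 : p = "transformer.h."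
  · subst h4; decide
  rw [if_neg h0, if_neg h1, if_neg h2, if_neg h3, if_neg h4]
  have e0 : ("model.layers." == p) = false := beq_eq_false_iff_ne.mpr (Ne.symm h0)
  have e1 : ("language_model.model.layers." == p) = false := beq_eq_false_iff_ne.mpr (Ne.symm h1)
  have e2 : ("model.language_model.model.layers." == p) = false := beq_eq_false_iff_ne.mpr (Ne.symm h2)
  have e3 : ("model.model.language_model.layers." == p) = false := beq_eq_false_iff_ne.mpr (Ne.symm h3)
  have e4 : ("transformer.h." == p) = false := beq_eq_false_iff_ne.mpr (Ne.symm h4)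
  simp [pvPrio, PySem.Dict.getD, PySem.Dict.get?, PySem.Dict.insert, PySem.Dict.empty,
    pvCands, List.find?, e0, e1, e2, e3, e4]

theorem prKey_le (k : String) : prKey k ≤ 5 := by
  cases hcl : pvClassify k with
  | none => simp [prKey, hcl]
  | some p => simp only [prKey, hcl]; rw [getD_prio]; split_ifs <;> omega

-- prKey k = i < 5 exactly when k starts with candidate i followed by "0."
theorem prKey_iff (k : String) (i : Nat) (hi : i < 5) :
    prKey k = i ↔ PySem.Str.startswith k (pvCands.getD i "" ++ "0.") = true := by
  constructor
  · intro h
    cases hcl : pvClassify k with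
    | none => simp [prKey, hcl] at h; omega
    | some p =>
      simp only [prKey, hcl] at h
      rw [getD_prio] at h
      have hsw := classify_sound k p hcl
      split_ifs at h with g0 g1 g2 g3 g4
      · subst g0; rw [← h]; exact hsw
      · subst g1; rw [← h]; exact hsw
      · subst g2; rw [← h]; exact hsw
      · subst g3; rw [← h]; exact hsw
      · subst g4; rw [← h]; exact hsw
      · omega
  · intro h
    interval_cases i
    · have hc := classify_complete_layers "model.layers." k
        (by decide) (by decide) (by decide) (by decide) (by decide) h
      simp only [prKey, hc]; decide
    · have hc := classify_complete_layers "language_model.model.layers." k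
        (by decide) (by decide) (by decide) (by decide) (by decide) h
      simp only [prKey, hc]; decide
    · have hc := classify_complete_layers "model.language_model.model.layers." k
        (by decide) (by decide) (by decide) (by decide) (by decide) h
      simp only [prKey, hc]; decide
    · have hc := classify_complete_layers "model.model.language_model.layers." k
        (by decide) (by decide) (by decide) (by decide) (by decide) h
      simp only [prKey, hc]; decide
    · have h' : PySem.Str.startswith k "transformer.h.0." = true := h
      have hc : pvClassify k = some "transformer.h." := by
        rw [pvClassify, if_pos h']
      simp only [prKey, hc]; decide

-- ---- B's fold, split into its two independent components ----

-- one step of B's loop, componentwise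
theorem bStep_snd (st : Nat × Option String) (kv : String × String) :
    (bStep st kv).2 =
      if PySem.Str.isIn ".layers.0." kv.1 && st.2.isNone && !(PySem.Str.isIn "vision" kv.1) then
        some (pvExtract kv.1)
      else st.2 := by
  unfold bStep
  cases pvClassify kv.1 <;> simp

theorem bStep_fst (st : Nat × Option String) (kv : String × String) (hb : st.1 ≤ 5) :
    (bStep st kv).1 = min st.1 (prKey kv.1) := by
  unfold bStep prKey
  cases pvClassify kv.1 with
  | none => simp; omega
  | some p =>
    rcases Nat.lt_or_ge (PySem.Dict.getD pvPrio p 5) st.1 with hlt | hge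
    · simp only [if_pos hlt]; omega
    · simp only [if_neg (by omega : ¬ PySem.Dict.getD pvPrio p 5 < st.1)]; omega

-- the fallback component: first matching key's extraction (proof-side restatement of the scan)
def fbScan : List (String × String) → Option String
  | [] => none
  | kv :: rest =>
    if PySem.Str.isIn ".layers.0." kv.1 && !(PySem.Str.isIn "vision" kv.1) then
      some (pvExtract kv.1)
    else fbScan rest

theorem fold_snd_some (sd : List (String × String)) (x : String) :
    ∀ st : Nat × Option String, st.2 = some x → (sd.foldl bStep st).2 = some x := by
  induction sd with
  | nil => intro st h; exact h
  | cons kv rest ih =>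
    intro st h
    rw [List.foldl_cons]
    apply ih
    rw [bStep_snd, h]
    simp

theorem fold_snd (sd : List (String × String)) :
    ∀ st : Nat × Option String, st.2 = none → (sd.foldl bStep st).2 = fbScan sd := by
  induction sd with
  | nil => intro st h; exact h ▸ rfl
  | cons kv rest ih =>
    intro st h
    rw [List.foldl_cons, fbScan]
    by_cases hc : (PySem.Str.isIn ".layers.0." kv.1 && !(PySem.Str.isIn "vision" kv.1)) = true
    · rw [if_pos hc]
      apply fold_snd_some
      rw [bStep_snd, h]
      simpa using hc
    · rw [if_neg hc]
      apply ih
      rw [bStep_snd, h]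
      simp only [Option.isNone_none, Bool.and_true]
      rw [if_neg (by simpa using hc)]

theorem fallback_eq (sd : List (String × String)) :
    pvFallback sd = (match fbScan sd with | some p => p | none => "") := by
  induction sd with
  | nil => rfl
  | cons kv rest ih =>
    rw [pvFallback, fbScan]
    by_cases hc : (PySem.Str.isIn ".layers.0." kv.1 && !(PySem.Str.isIn "vision" kv.1)) = true
    · rw [if_pos hc, if_pos hc]
    · rw [if_neg hc, if_neg hc, ih]

-- the best-priority component is a min-fold of prKey
theorem fold_fst (sd : List (String × String)) :
    ∀ st : Nat × Option String, st.1 ≤ 5 →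
      (sd.foldl bStep st).1 = sd.foldl (fun b kv => min b (prKey kv.1)) st.1 := by
  induction sd with
  | nil => intro st _; rfl
  | cons kv rest ih =>
    intro st hb
    rw [List.foldl_cons, List.foldl_cons]
    rw [ih (bStep st kv) (by rw [bStep_fst st kv hb]; have := prKey_le kv.1; omega)]
    rw [bStep_fst st kv hb]

theorem mf_le_init (sd : List (String × String)) (b0 : Nat) :
    sd.foldl (fun b kv => min b (prKey kv.1)) b0 ≤ b0 := by
  induction sd generalizing b0 with
  | nil => simp
  | cons kv rest ih =>
    rw [List.foldl_cons]
    exact le_trans (ih _) (by omega)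

theorem mf_le_mem (sd : List (String × String)) (kv : String × String) (h : kv ∈ sd) :
    ∀ b0 : Nat, sd.foldl (fun b kv => min b (prKey kv.1)) b0 ≤ prKey kv.1 := by
  induction sd with
  | nil => cases h
  | cons kv' rest ih =>
    intro b0
    rw [List.foldl_cons]
    rcases List.mem_cons.mp h with rfl | h'
    · exact le_trans (mf_le_init _ _) (by omega)
    · exact ih h' _

theorem mf_cases (sd : List (String × String)) (b0 : Nat) :
    sd.foldl (fun b kv => min b (prKey kv.1)) b0 = b0 ∨
      ∃ kv ∈ sd, sd.foldl (fun b kv => min b (prKey kv.1)) b0 = prKey kv.1 := by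
  induction sd generalizing b0 with
  | nil => left; rfl
  | cons kv rest ih =>
    rw [List.foldl_cons]
    rcases ih (min b0 (prKey kv.1)) with h | ⟨kv', h', he⟩
    · rcases Nat.le_total b0 (prKey kv.1) with hle | hle
      · left; rw [h]; omega
      · right; exact ⟨kv, List.mem_cons_self, by rw [h]; omega⟩
    · right; exact ⟨kv', List.mem_cons_of_mem _ h', he⟩

-- ===== VERDICT (by name: the statement is the Claim_ definition above) =====
theorem detect_layer_prefix_py_spec : Claim_equal_detect_layer_prefix_py := by
  intro sd _ _
  unfold Spec_detect_layer_prefix_py detect_layer_prefix_py detect_layer_prefix_py_alt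
  have hfst : (sd.foldl bStep (5, none)).1 = sd.foldl (fun b kv => min b (prKey kv.1)) 5 :=
    fold_fst sd (5, none) (le_refl 5)
  have hsnd : (sd.foldl bStep (5, none)).2 = fbScan sd := fold_snd sd (5, none) rfl
  rw [hfst, hsnd]
  have hub : ∀ kv ∈ sd, sd.foldl (fun b kv => min b (prKey kv.1)) 5 ≤ prKey kv.1 :=
    fun kv h => mf_le_mem sd kv h 5
  have hex := mf_cases sd 5
  have hle := mf_le_init sd 5
  have h0 : (sd.any fun kv => PySem.Str.startswith kv.1 ("model.layers." ++ "0.") && !(PySem.Str.isIn "vision" "model.layers.")) = true ↔ ∃ kv ∈ sd, prKey kv.1 = 0 := by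
    rw [show PySem.Str.isIn "vision" "model.layers." = false from by decide]
    rw [List.any_eq_true]
    constructor
    · rintro ⟨kv, hkv, hb⟩
      simp only [Bool.not_false, Bool.and_true] at hb
      exact ⟨kv, hkv, (prKey_iff kv.1 0 (by omega)).mpr hb⟩
    · rintro ⟨kv, hkv, hp⟩
      refine ⟨kv, hkv, ?_⟩
      simp only [Bool.not_false, Bool.and_true]
      exact (prKey_iff kv.1 0 (by omega)).mp hp
  have h1 : (sd.any fun kv => PySem.Str.startswith kv.1 ("language_model.model.layers." ++ "0.") && !(PySem.Str.isIn "vision" "language_model.model.layers.")) = true ↔ ∃ kv ∈ sd, prKey kv.1 = 1 := by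
    rw [show PySem.Str.isIn "vision" "language_model.model.layers." = false from by decide]
    rw [List.any_eq_true]
    constructor
    · rintro ⟨kv, hkv, hb⟩
      simp only [Bool.not_false, Bool.and_true] at hb
      exact ⟨kv, hkv, (prKey_iff kv.1 1 (by omega)).mpr hb⟩
    · rintro ⟨kv, hkv, hp⟩
      refine ⟨kv, hkv, ?_⟩
      simp only [Bool.not_false, Bool.and_true]
      exact (prKey_iff kv.1 1 (by omega)).mp hp
  have h2 : (sd.any fun kv => PySem.Str.startswith kv.1 ("model.language_model.model.layers." ++ "0.") && !(PySem.Str.isIn "vision" "model.language_model.model.layers.")) = true ↔ ∃ kv ∈ sd, prKey kv.1 = 2 := by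
    rw [show PySem.Str.isIn "vision" "model.language_model.model.layers." = false from by decide]
    rw [List.any_eq_true]
    constructor
    · rintro ⟨kv, hkv, hb⟩
      simp only [Bool.not_false, Bool.and_true] at hb
      exact ⟨kv, hkv, (prKey_iff kv.1 2 (by omega)).mpr hb⟩
    · rintro ⟨kv, hkv, hp⟩
      refine ⟨kv, hkv, ?_⟩
      simp only [Bool.not_false, Bool.and_true]
      exact (prKey_iff kv.1 2 (by omega)).mp hp
  have h3 : (sd.any fun kv => PySem.Str.startswith kv.1 ("model.model.language_model.layers." ++ "0.") && !(PySem.Str.isIn "vision" "model.model.language_model.layers.")) = true ↔ ∃ kv ∈ sd, prKey kv.1 = 3 := by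
    rw [show PySem.Str.isIn "vision" "model.model.language_model.layers." = false from by decide]
    rw [List.any_eq_true]
    constructor
    · rintro ⟨kv, hkv, hb⟩
      simp only [Bool.not_false, Bool.and_true] at hb
      exact ⟨kv, hkv, (prKey_iff kv.1 3 (by omega)).mpr hb⟩
    · rintro ⟨kv, hkv, hp⟩
      refine ⟨kv, hkv, ?_⟩
      simp only [Bool.not_false, Bool.and_true]
      exact (prKey_iff kv.1 3 (by omega)).mp hp
  have h4 : (sd.any fun kv => PySem.Str.startswith kv.1 ("transformer.h." ++ "0.") && !(PySem.Str.isIn "vision" "transformer.h.")) = true ↔ ∃ kv ∈ sd, prKey kv.1 = 4 := by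
    rw [show PySem.Str.isIn "vision" "transformer.h." = false from by decide]
    rw [List.any_eq_true]
    constructor
    · rintro ⟨kv, hkv, hb⟩
      simp only [Bool.not_false, Bool.and_true] at hb
      exact ⟨kv, hkv, (prKey_iff kv.1 4 (by omega)).mpr hb⟩
    · rintro ⟨kv, hkv, hp⟩
      refine ⟨kv, hkv, ?_⟩
      simp only [Bool.not_false, Bool.and_true]
      exact (prKey_iff kv.1 4 (by omega)).mp hp
  simp only [pvCands, aScan]
  have hsplit : sd.foldl (fun b kv => min b (prKey kv.1)) 5 = 0 ∨
      sd.foldl (fun b kv => min b (prKey kv.1)) 5 = 1 ∨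
      sd.foldl (fun b kv => min b (prKey kv.1)) 5 = 2 ∨
      sd.foldl (fun b kv => min b (prKey kv.1)) 5 = 3 ∨
      sd.foldl (fun b kv => min b (prKey kv.1)) 5 = 4 ∨
      sd.foldl (fun b kv => min b (prKey kv.1)) 5 = 5 := by omega
  rcases hsplit with hcase | hcase | hcase | hcase | hcase | hcase
  · -- best priority is 0
    have hA0 : (sd.any fun kv => PySem.Str.startswith kv.1 ("model.layers." ++ "0.") && !(PySem.Str.isIn "vision" "model.layers.")) = true := by
      apply h0.mpr
      rcases hex with h5 | ⟨kv, hkv, hpk⟩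
      · omega
      · exact ⟨kv, hkv, by omega⟩
    rw [hcase, if_pos hA0, if_pos (show (0:Nat) < 5 by omega)]
    rfl
  · -- best priority is 1
    have hA0f : ¬ ((sd.any fun kv => PySem.Str.startswith kv.1 ("model.layers." ++ "0.") && !(PySem.Str.isIn "vision" "model.layers.")) = true) := by
      intro hc
      rcases h0.mp hc with ⟨kv, hkv, hp⟩
      have := hub kv hkv
      omega
    have hA1 : (sd.any fun kv => PySem.Str.startswith kv.1 ("language_model.model.layers." ++ "0.") && !(PySem.Str.isIn "vision" "language_model.model.layers.")) = true := by
      apply h1.mpr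
      rcases hex with h5 | ⟨kv, hkv, hpk⟩
      · omega
      · exact ⟨kv, hkv, by omega⟩
    rw [hcase, if_neg hA0f, if_pos hA1, if_pos (show (1:Nat) < 5 by omega)]
    rfl
  · -- best priority is 2
    have hA0f : ¬ ((sd.any fun kv => PySem.Str.startswith kv.1 ("model.layers." ++ "0.") && !(PySem.Str.isIn "vision" "model.layers.")) = true) := by
      intro hc
      rcases h0.mp hc with ⟨kv, hkv, hp⟩
      have := hub kv hkv
      omega
    have hA1f : ¬ ((sd.any fun kv => PySem.Str.startswith kv.1 ("language_model.model.layers." ++ "0.") && !(PySem.Str.isIn "vision" "language_model.model.layers.")) = true) := by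
      intro hc
      rcases h1.mp hc with ⟨kv, hkv, hp⟩
      have := hub kv hkv
      omega
    have hA2 : (sd.any fun kv => PySem.Str.startswith kv.1 ("model.language_model.model.layers." ++ "0.") && !(PySem.Str.isIn "vision" "model.language_model.model.layers.")) = true := by
      apply h2.mpr
      rcases hex with h5 | ⟨kv, hkv, hpk⟩
      · omega
      · exact ⟨kv, hkv, by omega⟩
    rw [hcase, if_neg hA0f, if_neg hA1f, if_pos hA2, if_pos (show (2:Nat) < 5 by omega)]
    rfl
  · -- best priority is 3
    have hA0f : ¬ ((sd.any fun kv => PySem.Str.startswith kv.1 ("model.layers." ++ "0.") && !(PySem.Str.isIn "vision" "model.layers.")) = true) := by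
      intro hc
      rcases h0.mp hc with ⟨kv, hkv, hp⟩
      have := hub kv hkv
      omega
    have hA1f : ¬ ((sd.any fun kv => PySem.Str.startswith kv.1 ("language_model.model.layers." ++ "0.") && !(PySem.Str.isIn "vision" "language_model.model.layers.")) = true) := by
      intro hc
      rcases h1.mp hc with ⟨kv, hkv, hp⟩
      have := hub kv hkv
      omega
    have hA2f : ¬ ((sd.any fun kv => PySem.Str.startswith kv.1 ("model.language_model.model.layers." ++ "0.") && !(PySem.Str.isIn "vision" "model.language_model.model.layers.")) = true) := by
      intro hc
      rcases h2.mp hc with ⟨kv, hkv, hp⟩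
      have := hub kv hkv
      omega
    have hA3 : (sd.any fun kv => PySem.Str.startswith kv.1 ("model.model.language_model.layers." ++ "0.") && !(PySem.Str.isIn "vision" "model.model.language_model.layers.")) = true := by
      apply h3.mpr
      rcases hex with h5 | ⟨kv, hkv, hpk⟩
      · omega
      · exact ⟨kv, hkv, by omega⟩
    rw [hcase, if_neg hA0f, if_neg hA1f, if_neg hA2f, if_pos hA3, if_pos (show (3:Nat) < 5 by omega)]
    rfl
  · -- best priority is 4
    have hA0f : ¬ ((sd.any fun kv => PySem.Str.startswith kv.1 ("model.layers." ++ "0.") && !(PySem.Str.isIn "vision" "model.layers.")) = true) := by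
      intro hc
      rcases h0.mp hc with ⟨kv, hkv, hp⟩
      have := hub kv hkv
      omega
    have hA1f : ¬ ((sd.any fun kv => PySem.Str.startswith kv.1 ("language_model.model.layers." ++ "0.") && !(PySem.Str.isIn "vision" "language_model.model.layers.")) = true) := by
      intro hc
      rcases h1.mp hc with ⟨kv, hkv, hp⟩
      have := hub kv hkv
      omega
    have hA2f : ¬ ((sd.any fun kv => PySem.Str.startswith kv.1 ("model.language_model.model.layers." ++ "0.") && !(PySem.Str.isIn "vision" "model.language_model.model.layers.")) = true) := by
      intro hc
      rcases h2.mp hc with ⟨kv, hkv, hp⟩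
      have := hub kv hkv
      omega
    have hA3f : ¬ ((sd.any fun kv => PySem.Str.startswith kv.1 ("model.model.language_model.layers." ++ "0.") && !(PySem.Str.isIn "vision" "model.model.language_model.layers.")) = true) := by
      intro hc
      rcases h3.mp hc with ⟨kv, hkv, hp⟩
      have := hub kv hkv
      omega
    have hA4 : (sd.any fun kv => PySem.Str.startswith kv.1 ("transformer.h." ++ "0.") && !(PySem.Str.isIn "vision" "transformer.h.")) = true := by
      apply h4.mpr
      rcases hex with h5 | ⟨kv, hkv, hpk⟩
      · omega
      · exact ⟨kv, hkv, by omega⟩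
    rw [hcase, if_neg hA0f, if_neg hA1f, if_neg hA2f, if_neg hA3f, if_pos hA4, if_pos (show (4:Nat) < 5 by omega)]
    rfl
  · -- no candidate witnessed: both take the fallback
    have hA0f : ¬ ((sd.any fun kv => PySem.Str.startswith kv.1 ("model.layers." ++ "0.") && !(PySem.Str.isIn "vision" "model.layers.")) = true) := by
      intro hc
      rcases h0.mp hc with ⟨kv, hkv, hp⟩
      have := hub kv hkv
      omega
    have hA1f : ¬ ((sd.any fun kv => PySem.Str.startswith kv.1 ("language_model.model.layers." ++ "0.") && !(PySem.Str.isIn "vision" "language_model.model.layers.")) = true) := by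
      intro hc
      rcases h1.mp hc with ⟨kv, hkv, hp⟩
      have := hub kv hkv
      omega
    have hA2f : ¬ ((sd.any fun kv => PySem.Str.startswith kv.1 ("model.language_model.model.layers." ++ "0.") && !(PySem.Str.isIn "vision" "model.language_model.model.layers.")) = true) := by
      intro hc
      rcases h2.mp hc with ⟨kv, hkv, hp⟩
      have := hub kv hkv
      omega
    have hA3f : ¬ ((sd.any fun kv => PySem.Str.startswith kv.1 ("model.model.language_model.layers." ++ "0.") && !(PySem.Str.isIn "vision" "model.model.language_model.layers.")) = true) := by
      intro hc
      rcases h3.mp hc with ⟨kv, hkv, hp⟩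
      have := hub kv hkv
      omega
    have hA4f : ¬ ((sd.any fun kv => PySem.Str.startswith kv.1 ("transformer.h." ++ "0.") && !(PySem.Str.isIn "vision" "transformer.h.")) = true) := by
      intro hc
      rcases h4.mp hc with ⟨kv, hkv, hp⟩
      have := hub kv hkv
      omega
    rw [hcase, if_neg (show ¬ (5:Nat) < 5 by omega), if_neg hA0f, if_neg hA1f, if_neg hA2f, if_neg hA3f, if_neg hA4f]
    exact fallback_eq sd
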